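-- pv_equiv track=rewrite | github.com/chanson02/ny-unifier | main.py | is_address
-- ===== SOURCE A (Python) =====
-- def is_address(string):
--     string = str(string)
--     sep_comma = string.split(", ")
--     sep_space = [sep for sep in string.split(" ") if sep != '']
--     try:
--         return (sep_space[0].replace("-", "").isdigit() or sep_comma[1][0:2].isdigit()) and (sep_space[-1].isdigit() or sep_space[-1].lower() == "usa") and len(sep_comma) > 1
--     except IndexError:
--         pass
--     if "-" in sep_space[-1]:
--         # phone number
--         return is_address(" ".join(sep_space[:-1]))
--     return False
-- ===== SOURCE B (Python) =====
-- def is_address(string):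
--     # Exception-free rewrite: explicit length checks and early returns instead of
--     # try/except-driven control flow, and the token list is maintained across
--     # iterations (popped and re-joined) instead of re-derived by recursion.
--     string = str(string)
--     tokens = [t for t in string.split(" ") if t != ""]
--     while tokens:
--         head_numeric = tokens[0].replace("-", "").isdigit()
--         parts = string.split(", ")
--         if len(parts) > 1:
--             last = tokens[-1]
--             return (head_numeric or parts[1][:2].isdigit()) and (last.isdigit() or last.lower() == "usa")
--         if head_numeric:
--             return False
--         if "-" not in tokens[-1]:
--             return False
--         # trailing phone-number-like token: drop it and retry
--         tokens.pop()
--         string = " ".join(tokens)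
--     return False
-- ===== Notes on version B (the rewrite author's own statement) =====
-- stated objective: simpler
-- what changed: Replaces A's try/except-plus-tail-recursion with an exception-free iterative loop: explicit comma-part-count checks and early returns decide each case directly, and the token list is maintained across iterations (popped and re-joined) instead of being re-derived by a recursive call.
-- crash fix: A raises IndexError when the string has no space-separated tokens, or when its head token is not numeric once hyphens are removed, the string contains no comma-space separator, and every token contains a hyphen (the phone-number-stripping loop then empties the token list); B returns False on all such inputs. — e.g. on is_address("ab-cd"): A raises IndexError, B returns false
import Mathlib
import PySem

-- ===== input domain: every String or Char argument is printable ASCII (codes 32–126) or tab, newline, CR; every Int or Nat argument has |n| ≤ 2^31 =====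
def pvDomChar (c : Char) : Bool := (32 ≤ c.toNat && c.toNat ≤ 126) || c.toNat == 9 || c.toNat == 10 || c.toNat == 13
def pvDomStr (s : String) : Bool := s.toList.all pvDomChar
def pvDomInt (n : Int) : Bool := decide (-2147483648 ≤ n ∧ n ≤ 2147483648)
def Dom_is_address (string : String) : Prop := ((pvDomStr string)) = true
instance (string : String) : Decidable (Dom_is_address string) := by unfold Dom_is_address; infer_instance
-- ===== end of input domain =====

-- B replaces A's try/except-plus-tail-recursion by an exception-free loop with explicit
-- checks and a maintained token list (objective: simpler).


-- ===== termination infrastructure (cited by port A's decreasing_by) =====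
-- A structural model of Python's s.split(" ") (PySem.Chars.splitOn s [' ']), needed to show
-- that re-splitting the re-joined, shortened token list yields fewer tokens.

def mapHead (f : List Char → List Char) : List (List Char) → List (List Char)
  | [] => []
  | x :: xs => f x :: xs

def splitSp : List Char → List (List Char)
  | [] => [[]]
  | c :: l => if c = ' ' then [] :: splitSp l else mapHead (fun x => c :: x) (splitSp l)

theorem splitSp_ne_nil (l : List Char) : splitSp l ≠ [] := by
  induction l with
  | nil => simp [splitSp]
  | cons c l ih =>
    simp only [splitSp]
    split
    · simp
    · cases h : splitSp l with
      | nil => exact absurd h ih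
      | cons q qs => simp [mapHead]

theorem mapHead_nil_append (xs : List (List Char)) : mapHead (fun x => [] ++ x) xs = xs := by
  cases xs <;> simp [mapHead]

theorem mapHead_id (xs : List (List Char)) : mapHead (fun x => x) xs = xs := by
  cases xs <;> simp [mapHead]

theorem mapHead_mapHead (f g : List Char → List Char) (xs : List (List Char)) :
    mapHead f (mapHead g xs) = mapHead (fun x => f (g x)) xs := by
  cases xs <;> simp [mapHead]

theorem go_space_eq (fuel : ℕ) : ∀ (l cur : List Char) (acc : List (List Char)), l.length < fuel →
    PySem.Chars.splitOn.go [' '] fuel l cur acc = acc.reverse ++ mapHead (fun x => cur.reverse ++ x) (splitSp l) := by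
  induction fuel with
  | zero => intro l cur acc h; omega
  | succ fuel ih =>
    intro l cur acc h
    cases l with
    | nil => simp [PySem.Chars.splitOn.go, splitSp, mapHead]
    | cons c rest =>
      by_cases hc : c = ' '
      · subst hc
        rw [PySem.Chars.splitOn.go]
        simp only [List.isPrefixOf, BEq.rfl, Bool.true_and, if_pos]
        rw [ih _ _ _ (by simp at h ⊢; omega)]
        simp only [splitSp, if_pos rfl]
        simp only [mapHead]
        cases hr : splitSp rest with
        | nil => exact absurd hr (splitSp_ne_nil rest)
        | cons q qs => simp [hr]
      · rw [PySem.Chars.splitOn.go]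
        rw [if_neg (by simp [List.isPrefixOf]; exact fun hh => absurd hh.symm hc)]
        rw [ih _ _ _ (by simp at h ⊢; omega)]
        simp [splitSp, hc, mapHead_mapHead]

theorem splitOn_space_eq (s : List Char) : PySem.Chars.splitOn s [' '] = splitSp s := by
  rw [PySem.Chars.splitOn, go_space_eq _ _ _ _ (Nat.lt_succ_self _)]
  simp [mapHead_nil_append, mapHead_id]

theorem not_space_mem_splitSp (s : List Char) : ∀ p ∈ splitSp s, ' ' ∉ p := by
  induction s with
  | nil => intro p hp; simp [splitSp] at hp; simp [hp]
  | cons c l ih =>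
    intro p hp
    simp only [splitSp] at hp
    by_cases hc : c = ' '
    · rw [if_pos hc] at hp
      rcases List.mem_cons.mp hp with h | h
      · simp [h]
      · exact ih p h
    · rw [if_neg hc] at hp
      cases hsp : splitSp l with
      | nil => exact absurd hsp (splitSp_ne_nil l)
      | cons q qs =>
        rw [hsp] at hp; simp [mapHead] at hp
        rcases hp with h | h
        · subst h
          intro hmem
          rcases List.mem_cons.mp hmem with h' | h'
          · exact hc h'.symm
          · exact ih q (by simp [hsp]) h'
        · exact ih p (by simp [hsp, h])

theorem splitSp_of_no_space (t : List Char) (h : ' ' ∉ t) : splitSp t = [t] := by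
  induction t with
  | nil => simp [splitSp]
  | cons c l ih =>
    simp only [splitSp]
    rw [if_neg (by intro hc; exact h (by simp [hc]))]
    rw [ih (by intro hm; exact h (by simp [hm]))]
    simp [mapHead]

theorem splitSp_append_space (t r : List Char) (h : ' ' ∉ t) :
    splitSp (t ++ ' ' :: r) = t :: splitSp r := by
  induction t with
  | nil => simp [splitSp]
  | cons c l ih =>
    simp only [List.cons_append, splitSp]
    rw [if_neg (by intro hc; exact h (by simp [hc]))]
    rw [ih (by intro hm; exact h (by simp [hm]))]
    simp [mapHead]

theorem splitSp_intercalate (L : List (List Char)) (hne : L ≠ [])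
    (h : ∀ t ∈ L, ' ' ∉ t) : splitSp (List.intercalate [' '] L) = L := by
  induction L with
  | nil => exact absurd rfl hne
  | cons t L' ih =>
    cases L' with
    | nil => simpa [List.intercalate] using splitSp_of_no_space t (h t (by simp))
    | cons u L'' =>
      have hjoin : List.intercalate [' '] (t :: u :: L'') =
          t ++ ' ' :: List.intercalate [' '] (u :: L'') := by
        simp [List.intercalate, List.intersperse]
      rw [hjoin, splitSp_append_space _ _ (h t (by simp))]
      rw [ih (by simp) (fun x hx => h x (by simp [List.mem_cons] at hx ⊢; tauto))]

-- tokens of a string: [t for t in s.split(" ") if t != ""]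
def pyTokens (s : List Char) : List (List Char) :=
  (PySem.Chars.splitOn s [' ']).filter (fun t => decide (t ≠ []))

theorem mem_pyTokens (s : List Char) (t : List Char) (h : t ∈ pyTokens s) :
    t ≠ [] ∧ ' ' ∉ t := by
  unfold pyTokens at h
  rw [splitOn_space_eq] at h
  have := List.mem_filter.mp h
  exact ⟨by simpa using this.2, not_space_mem_splitSp s t this.1⟩

theorem tokens_join (L : List (List Char)) (h : ∀ t ∈ L, t ≠ [] ∧ ' ' ∉ t) :
    pyTokens (PySem.Chars.join [' '] L) = L := by
  cases hL : L with
  | nil => simp [PySem.Chars.join, List.intercalate, pyTokens, splitOn_space_eq, splitSp]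
  | cons t L' =>
    unfold pyTokens
    rw [PySem.Chars.join, splitOn_space_eq,
      splitSp_intercalate (t :: L') (by simp) (fun x hx => (h x (hL ▸ hx)).2)]
    exact List.filter_eq_self.mpr (fun x hx => by simpa using (h x (hL ▸ hx)).1)

theorem tokens_join_dropLast (s : List Char) (h : pyTokens s ≠ []) :
    pyTokens (PySem.Chars.join [' '] (pyTokens s).dropLast) = (pyTokens s).dropLast :=
  tokens_join _ (fun t ht => mem_pyTokens s t (List.mem_of_mem_dropLast ht))

-- ===== PORT A =====
-- Literal port of A over the string's character list. When Python raises an uncaught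
-- IndexError (empty token list; excluded by Pre_), the port returns false.
def isAddrA (s : List Char) : Bool :=
  let sep_comma := PySem.Chars.splitOn s [',', ' ']
  match hs : pyTokens s with
  | [] =>
    -- sep_space[0] raises IndexError, caught; then sep_space[-1] raises uncaught (outside Pre_)
    false
  | s0 :: rest =>
    if PySem.Chars.strIsdigit (PySem.Chars.replace s0 ['-'] []) then
      -- first disjunct true; sep_comma[1] is not evaluated (short-circuit)
      (PySem.Chars.strIsdigit (PySem.List.pyGetD (s0 :: rest) (-1) []) ||
        PySem.Chars.lower (PySem.List.pyGetD (s0 :: rest) (-1) []) == "usa".toList) &&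
      decide (1 < sep_comma.length)
    else
      match PySem.List.pyGet? sep_comma 1 with
      | some c1 =>
        (PySem.Chars.strIsdigit (PySem.List.slice c1 (some 0) (some 2))) &&
        (PySem.Chars.strIsdigit (PySem.List.pyGetD (s0 :: rest) (-1) []) ||
          PySem.Chars.lower (PySem.List.pyGetD (s0 :: rest) (-1) []) == "usa".toList) &&
        decide (1 < sep_comma.length)
      | none =>
        -- IndexError caught by the except clause
        if PySem.Chars.isIn ['-'] (PySem.List.pyGetD (s0 :: rest) (-1) []) then
          isAddrA (PySem.Chars.join [' '] (s0 :: rest).dropLast)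
        else false
termination_by (pyTokens s).length
decreasing_by
  rw [show (s0 :: rest).dropLast = (pyTokens s).dropLast by rw [hs]]
  rw [tokens_join_dropLast s (by rw [hs]; simp), hs]
  simp

def is_address (string : String) : Bool := isAddrA string.toList

-- ===== PORT B =====
-- Port of Source B: iterative loop carrying (string, tokens); explicit checks, no exceptions.
def isAddrB (string : List Char) (tokens : List (List Char)) : Bool :=
  match tokens with
  | [] => false
  | t0 :: rest =>
    let head_numeric := PySem.Chars.strIsdigit (PySem.Chars.replace t0 ['-'] [])
    let parts := PySem.Chars.splitOn string [',', ' ']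
    if 1 < parts.length then
      let last := PySem.List.pyGetD (t0 :: rest) (-1) []
      (head_numeric ||
        PySem.Chars.strIsdigit (PySem.List.slice (PySem.List.pyGetD parts 1 []) none (some 2))) &&
      (PySem.Chars.strIsdigit last || PySem.Chars.lower last == "usa".toList)
    else if head_numeric then false
    else if !PySem.Chars.isIn ['-'] (PySem.List.pyGetD (t0 :: rest) (-1) []) then false
    else
      -- trailing phone-number-like token: drop it and retry
      isAddrB (PySem.Chars.join [' '] (t0 :: rest).dropLast) ((t0 :: rest).dropLast)
termination_by tokens.length
decreasing_by simp [List.length_dropLast]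

def is_address_alt (string : String) : Bool :=
  isAddrB string.toList (pyTokens string.toList)

-- ===== PRECONDITION & SPEC =====
-- Pre_ excludes exactly the inputs on which A raises an uncaught IndexError: strings with
-- no space-separated tokens, and strings whose head token is not numeric once hyphens are
-- removed, that contain no comma-space separator, and all of whose tokens contain a hyphen
-- (the stripping loop then empties the token list).
def Pre_is_address (string : String) : Prop :=
  pyTokens string.toList ≠ [] ∧
    (PySem.Chars.strIsdigit
        (PySem.Chars.replace (pyTokens string.toList).headI ['-'] []) = true ∨
      PySem.Chars.isIn [',', ' '] string.toList = true ∨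
      ∃ t ∈ pyTokens string.toList, PySem.Chars.isIn ['-'] t = false)
instance (string : String) : Decidable (Pre_is_address string) := by
  unfold Pre_is_address; infer_instance

def pvWitness_is_address : String := "12 Main St, Springfield"

-- A raises IndexError when the string has no space-separated tokens, or when its head
-- token is not numeric once hyphens are removed, the string contains no comma-space
-- separator, and every token contains a hyphen; B returns False on all such inputs.
def Raises_is_address (string : String) : Prop :=
  pyTokens string.toList = [] ∨
    (PySem.Chars.strIsdigit
        (PySem.Chars.replace (pyTokens string.toList).headI ['-'] []) = false ∧
      PySem.Chars.isIn [',', ' '] string.toList = false ∧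
      ∀ t ∈ pyTokens string.toList, PySem.Chars.isIn ['-'] t = true)
instance (string : String) : Decidable (Raises_is_address string) := by
  unfold Raises_is_address; infer_instance

def pvRaiseWitness_is_address : String := "ab-cd"
def pvRaiseWitnessOut_is_address : Bool := false

def Spec_is_address (string : String) (out : Bool) : Prop := out = is_address_alt string
instance (string : String) (out : Bool) : Decidable (Spec_is_address string out) := by
  unfold Spec_is_address; infer_instance

-- ===== CLAIM (what is proved, stated in full; the proofs are below) =====
def Claim_equal_is_address : Prop := ∀ (string : String), Dom_is_address string →
  Pre_is_address string → Spec_is_address string (is_address string)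

def Claim_raises_is_address : Prop :=
  (∀ (string : String), Dom_is_address string → Raises_is_address string →
    ¬ Pre_is_address string) ∧
  (Dom_is_address (pvRaiseWitness_is_address) ∧ Raises_is_address (pvRaiseWitness_is_address) ∧
    is_address_alt (pvRaiseWitness_is_address) = pvRaiseWitnessOut_is_address)

-- ===== LEMMAS AND PROOFS =====

theorem isAddrA_nil (s : List Char) (h : pyTokens s = []) : isAddrA s = false := by
  rw [isAddrA.eq_def]
  split
  · rfl
  · next s0 rest hs => rw [h] at hs; cases hs

theorem isAddrA_cons (s : List Char) (s0 : List Char) (rest : List (List Char))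
    (h : pyTokens s = s0 :: rest) :
    isAddrA s =
      (if PySem.Chars.strIsdigit (PySem.Chars.replace s0 ['-'] []) then
        (PySem.Chars.strIsdigit (PySem.List.pyGetD (s0 :: rest) (-1) []) ||
          PySem.Chars.lower (PySem.List.pyGetD (s0 :: rest) (-1) []) == "usa".toList) &&
        decide (1 < (PySem.Chars.splitOn s [',', ' ']).length)
      else
        match PySem.List.pyGet? (PySem.Chars.splitOn s [',', ' ']) 1 with
        | some c1 =>
          (PySem.Chars.strIsdigit (PySem.List.slice c1 (some 0) (some 2))) &&
          (PySem.Chars.strIsdigit (PySem.List.pyGetD (s0 :: rest) (-1) []) ||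
            PySem.Chars.lower (PySem.List.pyGetD (s0 :: rest) (-1) []) == "usa".toList) &&
          decide (1 < (PySem.Chars.splitOn s [',', ' ']).length)
        | none =>
          if PySem.Chars.isIn ['-'] (PySem.List.pyGetD (s0 :: rest) (-1) []) then
            isAddrA (PySem.Chars.join [' '] (s0 :: rest).dropLast)
          else false) := by
  rw [isAddrA.eq_def]
  split
  · next heq => rw [h] at heq; cases heq
  · next t0 r hs =>
    rw [h] at hs
    injection hs with h1 h2
    subst h1; subst h2
    rfl

theorem isAddrA_eq_isAddrB : ∀ (n : ℕ) (s : List Char), (pyTokens s).length ≤ n →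
    isAddrA s = isAddrB s (pyTokens s) := by
  intro n
  induction n with
  | zero =>
    intro s hlen
    have h0 : pyTokens s = [] := List.length_eq_zero_iff.mp (Nat.le_zero.mp hlen)
    rw [isAddrA_nil s h0, h0, isAddrB.eq_def]
  | succ n ih =>
    intro s hlen
    cases hT : pyTokens s with
    | nil => rw [isAddrA_nil s hT, isAddrB.eq_def]
    | cons s0 rest =>
      rw [isAddrA_cons s s0 rest hT, isAddrB.eq_def]
      by_cases hnum :
          PySem.Chars.strIsdigit (PySem.Chars.replace s0 ['-'] []) = true
      · by_cases hp : 1 < (PySem.Chars.splitOn s [',', ' ']).length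
        · simp [hnum, hp]
        · simp [hnum, hp]
      · have hnum' := eq_false_of_ne_true hnum
        cases hg : PySem.List.pyGet? (PySem.Chars.splitOn s [',', ' ']) 1 with
        | some c1 =>
          have hidx : (PySem.Chars.splitOn s [',', ' '])[1]? = some c1 := by
            rw [← PySem.List.pyGet?_ofNat' (PySem.Chars.splitOn s [',', ' ']) 1]; exact hg
          obtain ⟨hp, hval⟩ := List.getElem?_eq_some_iff.mp hidx
          have hone : PySem.List.pyGetD (PySem.Chars.splitOn s [',', ' ']) 1 [] = c1 := by
            rw [show (1 : Int) = ((1 : ℕ) : Int) from rfl, PySem.List.pyGetD_natCast]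
            simp [List.getD, hidx]
          simp [hnum', hp, hone]
        | none =>
          have hidx : (PySem.Chars.splitOn s [',', ' '])[1]? = none := by
            rw [← PySem.List.pyGet?_ofNat' (PySem.Chars.splitOn s [',', ' ']) 1]; exact hg
          have hp : ¬ 1 < (PySem.Chars.splitOn s [',', ' ']).length := by
            have := List.getElem?_eq_none_iff.mp hidx
            omega
          have hdrop : pyTokens (PySem.Chars.join [' '] (s0 :: rest).dropLast) =
              (s0 :: rest).dropLast := by
            rw [show (s0 :: rest).dropLast = (pyTokens s).dropLast by rw [hT]]
            rw [tokens_join_dropLast s (by rw [hT]; simp), hT]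
          have hlen' :
              (pyTokens (PySem.Chars.join [' '] (s0 :: rest).dropLast)).length ≤ n := by
            rw [hdrop]
            have hl : (s0 :: rest).length ≤ n + 1 := by rw [← hT]; exact hlen
            simp only [List.length_dropLast]
            simp at hl ⊢
            omega
          have hrec := ih _ hlen'
          rw [hdrop] at hrec
          by_cases hdash :
              PySem.Chars.isIn ['-'] (PySem.List.pyGetD (s0 :: rest) (-1) []) = true
          · simp [hnum', hp, hdash, hrec]
          · simp [hnum', hp, hdash]

theorem is_address_spec : Claim_equal_is_address := by
  intro string _ _
  unfold Spec_is_address is_address is_address_alt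
  exact isAddrA_eq_isAddrB (pyTokens string.toList).length string.toList le_rfl

theorem is_address_raises : Claim_raises_is_address := by
  unfold Claim_raises_is_address
  constructor
  · intro string _ hr hp
    rcases hr with hr | hr
    · exact hp.1 hr
    · rcases hp.2 with h | h | ⟨t, ht, hdt⟩
      · rw [hr.1] at h; exact Bool.false_ne_true h
      · rw [hr.2.1] at h; exact Bool.false_ne_true h
      · rw [hr.2.2 t ht] at hdt; exact Bool.noConfusion hdt
  · refine ⟨by decide, by decide, ?_⟩
    show isAddrB "ab-cd".toList (pyTokens "ab-cd".toList) = false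
    rw [show pyTokens "ab-cd".toList = [['a','b','-','c','d']] from by decide]
    rw [isAddrB.eq_def]
    dsimp only
    split_ifs with h1 h2 h3
    · exact absurd h1 (by decide)
    · rfl
    · rfl
    · rw [isAddrB.eq_def]
      rfl

-- bundled self-check that both delivered claims hold together
theorem is_address_claims_ok : Claim_equal_is_address ∧ Claim_raises_is_address :=
  ⟨is_address_spec, is_address_raises⟩
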